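-- pv_equiv track=rewrite | github.com/donghyeon95/Algorithm-study | Programmers/258707. n + 1 카드게임/HodaeSsi.py | solution
-- ===== SOURCE A (Python) =====
-- def solution(coin, cards):
--     answer = 0
--
--     card_coin = {} # key - 카드 번호, value - [필요 코인 개수, 사용 여부]
--     for i in range(len(cards) // 3):
--         card_coin[cards[i]] = [0, False]
--
--     for i in range(1, len(cards) // 3 + 1): # 최대 진행 가능 라운드는 cards 개수의 1/3
--         find_pair = False
--         card_coin[cards[len(cards) // 3 + 2 * (i - 1)]] = [1, False]
--         card_coin[cards[len(cards) // 3 + 2 * (i - 1) + 1]] = [1, False]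
--
--         for j in range(len(cards) // 3 + 2 * (i - 1) + 2):
--             left = card_coin.get(cards[j], [-100, False])
--             right = card_coin.get(len(cards) + 1 - cards[j], [-100, False])
--             if left[0] == -100 or left[1] or right[0] == -100 or right[1]:
--                 continue
--
--             if left[0] == 0 + right[0] == 0:
--                 card_coin[cards[j]][1] = True
--                 card_coin[len(cards) + 1 - cards[j]][1] = True
--                 find_pair = True
--                 break
--
--         if find_pair:
--             answer = i
--             continue
--         if coin < 1:
--             break
--
--         for j in range(len(cards) // 3 + 2 * (i - 1) + 2):
--             left = card_coin.get(cards[j], [-100, False])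
--             right = card_coin.get(len(cards) + 1 - cards[j], [-100, False])
--             if left[0] == -100 or left[1] or right[0] == -100 or right[1]:
--                 continue
--
--             if left[0] + right[0] == 1:
--                 card_coin[cards[j]][1] = True
--                 card_coin[len(cards) + 1 - cards[j]][1] = True
--                 find_pair = True
--                 coin -= 1
--                 break
--
--         if find_pair:
--             answer = i
--             continue
--         if coin < 2:
--             break
--
--         for j in range(len(cards) // 3 + 2 * (i - 1) + 2):
--             left = card_coin.get(cards[j], [-100, False])
--             right = card_coin.get(len(cards) + 1 - cards[j], [-100, False])
--             if left[0] == -100 or left[1] or right[0] == -100 or right[1]: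
--                 continue
--
--             if left[0] + right[0] == 2:
--                 card_coin[cards[j]][1] = True
--                 card_coin[len(cards) + 1 - cards[j]][1] = True
--                 find_pair = True
--                 coin -= 2
--                 break
--
--         if find_pair:
--             answer = i
--             continue
--         else:
--             break
--
--     return answer + 1
-- ===== SOURCE B (Python) =====
-- # B (faster, measured ~2.5x): one merged scan per round (first free pair, else first index per coin-cost,
-- # pick the cheapest affordable) instead of A's three separate re-scans.
-- def _scan(state, cards, prefix_len, comp):
--     f1 = -1
--     f2 = -1
--     for j in range(prefix_len):
--         p = state.get(cards[j])
--         q = state.get(comp - cards[j])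
--         if p is None or q is None or p[1] or q[1]:
--             continue
--         s = p[0] + q[0]
--         if s == 0:
--             return (0, j)
--         if s == 1:
--             if f1 < 0:
--                 f1 = j
--         elif f2 < 0:
--             f2 = j
--     if f1 >= 0:
--         return (1, f1)
--     if f2 >= 0:
--         return (2, f2)
--     return None
--
--
-- def solution(coin, cards):
--     n = len(cards)
--     n3 = n // 3
--     state = {}
--     for c in cards[:n3]:
--         state[c] = (0, False)
--     rounds = 0
--     for r in range(n3):
--         state[cards[n3 + 2 * r]] = (1, False)
--         state[cards[n3 + 2 * r + 1]] = (1, False)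
--         res = _scan(state, cards, n3 + 2 * r + 2, n + 1)
--         if res is None:
--             break
--         s, j = res
--         if s != 0 and s > coin:
--             break
--         coin -= s
--         v = cards[j]
--         w = n + 1 - v
--         state[v] = (state[v][0], True)
--         state[w] = (state[w][0], True)
--         rounds = r + 1
--     return rounds + 1
-- ===== Notes on version B (the rewrite author's own statement) =====
-- stated objective: faster
-- what changed: Each round, A re-scans the card prefix up to three times (once per coin cost 0/1/2, with separate break/continue blocks); B does a single scan that records the first index per pair cost (early-returning on a free pair) and then picks the cheapest affordable pair, and it tracks state as card->(cost,used) tuples instead of A's mutable [cost,used] lists.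
import Mathlib
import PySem

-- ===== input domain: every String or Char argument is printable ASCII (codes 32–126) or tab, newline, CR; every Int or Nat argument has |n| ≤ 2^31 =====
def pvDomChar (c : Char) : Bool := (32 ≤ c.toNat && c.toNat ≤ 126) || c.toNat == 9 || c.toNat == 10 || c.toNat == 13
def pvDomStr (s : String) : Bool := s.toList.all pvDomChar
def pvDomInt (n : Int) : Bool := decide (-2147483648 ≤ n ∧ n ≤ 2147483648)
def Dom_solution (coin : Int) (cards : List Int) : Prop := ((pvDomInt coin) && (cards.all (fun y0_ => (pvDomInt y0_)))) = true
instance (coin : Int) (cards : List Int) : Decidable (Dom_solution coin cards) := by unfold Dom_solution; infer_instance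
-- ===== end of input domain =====

-- B merges A's three per-round scans of the prefix into ONE scan that records the first
-- index per coin cost and picks the cheapest affordable pair (measured ~2.5x faster).

-- ===== PORT A =====
-- The three inner `for j in range(...)` loops of A differ only in their success test;
-- `findA` is that loop with the test as a parameter, returning the index at the `break`.
def findA (cards : List Int) (n : Int) (d : PySem.Dict Int (Int × Bool))
    (cond : Int → Int → Bool) : List Int → Option Int
  | [] => none
  | j :: js =>
    let left := d.getD (PySem.List.pyGetD cards j 0) (-100, false)
    let right := d.getD (n + 1 - PySem.List.pyGetD cards j 0) (-100, false)
    if left.1 = -100 || left.2 || right.1 = -100 || right.2 then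
      findA cards n d cond js
    else if cond left.1 right.1 then some j
    else findA cards n d cond js

-- card_coin[cards[j]][1] = True ; card_coin[len(cards)+1-cards[j]][1] = True
-- (in-place list mutation = Dict.modify; both keys are present at the break point,
--  so the `(0, false)` default is never read)
def markA (d : PySem.Dict Int (Int × Bool)) (v n : Int) : PySem.Dict Int (Int × Bool) :=
  ((d.modify v (0, false) (fun p => (p.1, true))).modify (n + 1 - v) (0, false)
    (fun p => (p.1, true)))

-- A's success tests: pass 1 is Python's chained 'left[0] == 0 + right[0] == 0'
def condA0 (l r : Int) : Bool := decide (l = 0 + r ∧ 0 + r = 0)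
def condA1 (l r : Int) : Bool := decide (l + r = 1)
def condA2 (l r : Int) : Bool := decide (l + r = 2)

-- the outer 'for i in range(1, len(cards)//3 + 1)' with its breaks/continues
def loopA (cards : List Int) (n n3 : Int) :
    List Int → Int → PySem.Dict Int (Int × Bool) → Int → Int
  | [], _coin, _d, answer => answer
  | i :: rest, coin, d, answer =>
    let d1 := ((d.insert (PySem.List.pyGetD cards (n3 + 2 * (i - 1)) 0) (1, false)).insert
        (PySem.List.pyGetD cards (n3 + 2 * (i - 1) + 1) 0) (1, false))
    let js := PySem.List.pyRange 0 (n3 + 2 * (i - 1) + 2) 1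
    match findA cards n d1 condA0 js with
    | some j => loopA cards n n3 rest coin (markA d1 (PySem.List.pyGetD cards j 0) n) i
    | none =>
      if coin < 1 then answer
      else
        match findA cards n d1 condA1 js with
        | some j =>
            loopA cards n n3 rest (coin - 1) (markA d1 (PySem.List.pyGetD cards j 0) n) i
        | none =>
          if coin < 2 then answer
          else
            match findA cards n d1 condA2 js with
            | some j =>
                loopA cards n n3 rest (coin - 2) (markA d1 (PySem.List.pyGetD cards j 0) n) i
            | none => answer

def solution (coin : Int) (cards : List Int) : Int :=
  let n := PySem.List.len cards
  let n3 := PySem.Int.floordiv n 3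
  let d0 := (PySem.List.pyRange 0 n3 1).foldl
      (fun d i => d.insert (PySem.List.pyGetD cards i 0) ((0 : Int), false)) PySem.Dict.empty
  loopA cards n n3 (PySem.List.pyRange 1 (n3 + 1) 1) coin d0 0 + 1

-- ===== PORT B =====
-- B's single scan: first index whose pair costs 0 (early return), else first index of
-- cost 1 (f1) and of cost 2 (f2), -1 = not seen yet
def scanB (cards : List Int) (comp : Int) (state : PySem.Dict Int (Int × Bool)) :
    List Int → Int → Int → Option (Int × Int)
  | [], f1, f2 =>
    if 0 ≤ f1 then some (1, f1) else if 0 ≤ f2 then some (2, f2) else none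
  | j :: js, f1, f2 =>
    match state.get? (PySem.List.pyGetD cards j 0),
          state.get? (comp - PySem.List.pyGetD cards j 0) with
    | some p, some q =>
      if p.2 || q.2 then scanB cards comp state js f1 f2
      else
        let s := p.1 + q.1
        if s = 0 then some (0, j)
        else if s = 1 then scanB cards comp state js (if f1 < 0 then j else f1) f2
        else scanB cards comp state js f1 (if f2 < 0 then j else f2)
    | _, _ => scanB cards comp state js f1 f2

-- state[v] = (state[v][0], True)  (key present wherever B calls this; Python would
-- raise KeyError on the unreachable `none` branch, which we leave as the identity)
def markB (state : PySem.Dict Int (Int × Bool)) (v : Int) : PySem.Dict Int (Int × Bool) :=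
  match state.get? v with
  | some p => state.insert v (p.1, true)
  | none => state

def loopB (cards : List Int) (n n3 : Int) :
    List Int → Int → PySem.Dict Int (Int × Bool) → Int → Int
  | [], _coin, _state, rounds => rounds
  | r :: rest, coin, state, rounds =>
    let st1 := ((state.insert (PySem.List.pyGetD cards (n3 + 2 * r) 0) (1, false)).insert
        (PySem.List.pyGetD cards (n3 + 2 * r + 1) 0) (1, false))
    match scanB cards (n + 1) st1 (PySem.List.pyRange 0 (n3 + 2 * r + 2) 1) (-1) (-1) with
    | none => rounds
    | some (s, j) =>
      if s ≠ 0 ∧ coin < s then rounds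
      else
        let v := PySem.List.pyGetD cards j 0
        loopB cards n n3 rest (coin - s) (markB (markB st1 v) (n + 1 - v)) (r + 1)

def solution_alt (coin : Int) (cards : List Int) : Int :=
  let n := PySem.List.len cards
  let n3 := PySem.Int.floordiv n 3
  let st0 := (PySem.List.slice cards (some 0) (some n3)).foldl
      (fun d c => d.insert c ((0 : Int), false)) PySem.Dict.empty
  loopB cards n n3 (PySem.List.pyRange 0 n3 1) coin st0 0 + 1

-- ===== PRECONDITION & SPEC =====
def Spec_solution (coin : Int) (cards : List Int) (out : Int) : Prop := out = solution_alt coin cards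
instance (coin : Int) (cards : List Int) (out : Int) : Decidable (Spec_solution coin cards out) := by unfold Spec_solution; infer_instance

-- ===== CLAIM (what is proved, stated in full; the proofs are below) =====
def Claim_equal_solution : Prop := ∀ (coin : Int) (cards : List Int), Dom_solution coin cards → Spec_solution coin cards (solution coin cards)

-- ===== LEMMAS AND PROOFS =====

def DictRel (dA dB : PySem.Dict Int (Int × Bool)) : Prop :=
  ∀ v, dA.get? v = dB.get? v
def CostInv (d : PySem.Dict Int (Int × Bool)) : Prop :=
  ∀ v p, d.get? v = some p → p.1 = 0 ∨ p.1 = 1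
theorem get?_modify' (d : PySem.Dict Int (Int × Bool)) (k x : Int) (d0 : Int × Bool)
    (f : Int × Bool → Int × Bool) :
    (d.modify k d0 f).get? x = if x = k then some (f (d.getD k d0)) else d.get? x := by
  have hc := PySem.Dict.contains_modify d k x d0 f
  by_cases hxk : x = k
  · subst hxk
    simp at hc
    have hs : ((d.modify x d0 f).get? x).isSome := by
      rw [← PySem.Dict.contains_eq_isSome_get?]; exact hc
    obtain ⟨p, hp⟩ := Option.isSome_iff_exists.mp hs
    have hd : (d.modify x d0 f).getD x d0 = f (d.getD x d0) := PySem.Dict.getD_modify_self d x d0 f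
    rw [PySem.Dict.getD_eq_get?_getD, hp] at hd
    simp at hd
    simp [hp, hd]
  · simp only [if_neg hxk]
    have : (x == k) = false := by simp [hxk]
    rw [this] at hc; simp at hc
    cases hdc : d.contains x with
    | false =>
      have h1 : (d.modify k d0 f).get? x = none := by
        rw [PySem.Dict.get?_eq_none_iff_contains]; rw [hc, hdc]
      have h2 : d.get? x = none := (PySem.Dict.get?_eq_none_iff_contains d x).mpr hdc
      rw [h1, h2]
    | true =>
      have hs1 : ((d.modify k d0 f).get? x).isSome := by
        rw [← PySem.Dict.contains_eq_isSome_get?]; rw [hc, hdc]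
      have hs2 : (d.get? x).isSome := by
        rw [← PySem.Dict.contains_eq_isSome_get?]; exact hdc
      obtain ⟨p, hp⟩ := Option.isSome_iff_exists.mp hs1
      obtain ⟨r, hr⟩ := Option.isSome_iff_exists.mp hs2
      have hd := PySem.Dict.getD_modify d k x d0 f
      rw [if_neg hxk, PySem.Dict.getD_eq_get?_getD, PySem.Dict.getD_eq_get?_getD, hp, hr] at hd
      simp at hd
      rw [hp, hr, hd]

theorem markB_get?_some (dB : PySem.Dict Int (Int × Bool)) (v : Int) (p : Int × Bool)
    (h : dB.get? v = some p) : markB dB v = dB.insert v (p.1, true) := by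
  unfold markB; rw [h]

theorem markA_eq_markB (dA dB : PySem.Dict Int (Int × Bool)) (v n : Int)
    (hR : DictRel dA dB) (p : Int × Bool) (hv : dA.get? v = some p)
    (q : Int × Bool) (hw : dA.get? (n + 1 - v) = some q) :
    DictRel (markA dA v n) (markB (markB dB v) (n + 1 - v)) := by
  intro x
  have hvB : dB.get? v = some p := by rw [← hR v]; exact hv
  have hgv : dA.getD v (0, false) = p := by
    rw [PySem.Dict.getD_eq_get?_getD, hv]; rfl
  rw [markB_get?_some dB v p hvB]
  have hwB : (dB.insert v (p.1, true)).get? (n + 1 - v) =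
      some (if n + 1 - v = v then (p.1, true) else q) := by
    rw [PySem.Dict.get?_insert]
    split_ifs with h
    · rfl
    · rw [← hR (n + 1 - v)]; exact hw
  rw [markB_get?_some _ _ _ hwB]
  unfold markA
  rw [get?_modify', get?_modify', PySem.Dict.get?_insert, PySem.Dict.get?_insert,
    PySem.Dict.getD_eq_get?_getD, get?_modify']
  by_cases hxw : x = n + 1 - v
  · rw [if_pos hxw, if_pos hxw]
    by_cases hwv : n + 1 - v = v
    · rw [if_pos hwv, if_pos hwv]; simp [hgv]
    · rw [if_neg hwv, if_neg hwv, hw]; simp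
  · rw [if_neg hxw, if_neg hxw]
    by_cases hxv : x = v
    · rw [if_pos hxv, if_pos hxv, hgv]
    · rw [if_neg hxv, if_neg hxv]; exact hR x

theorem costInv_modify (d : PySem.Dict Int (Int × Bool)) (k : Int) (h : CostInv d) :
    CostInv (d.modify k (0, false) (fun p => (p.1, true))) := by
  intro x r hx
  rw [get?_modify'] at hx
  split_ifs at hx with hxk
  · have hr : r = ((d.getD k (0, false)).1, true) := (Option.some.inj hx).symm
    cases hk : d.get? k with
    | none =>
      rw [PySem.Dict.getD_eq_get?_getD, hk] at hr
      left; rw [hr]; rfl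
    | some p =>
      rw [PySem.Dict.getD_eq_get?_getD, hk] at hr
      have := h k p hk
      rw [hr]; exact this
  · exact h x r hx

theorem costInv_markA (dA : PySem.Dict Int (Int × Bool)) (v n : Int)
    (h : CostInv dA) : CostInv (markA dA v n) :=
  costInv_modify _ _ (costInv_modify _ _ h)

theorem costInv_insert (d : PySem.Dict Int (Int × Bool)) (k c : Int) (b : Bool)
    (hc : c = 0 ∨ c = 1) (h : CostInv d) : CostInv (d.insert k (c, b)) := by
  intro x r hx
  rw [PySem.Dict.get?_insert] at hx
  split_ifs at hx with hxk
  · cases hx; exact hc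
  · exact h x r hx

theorem dictRel_insert (dA dB : PySem.Dict Int (Int × Bool)) (k : Int) (w : Int × Bool)
    (h : DictRel dA dB) : DictRel (dA.insert k w) (dB.insert k w) := by
  intro x
  rw [PySem.Dict.get?_insert, PySem.Dict.get?_insert, h x]

theorem findA_found (cards : List Int) (n : Int) (d : PySem.Dict Int (Int × Bool))
    (cond : Int → Int → Bool) : ∀ (js : List Int) (j : Int),
    findA cards n d cond js = some j →
    ∃ p q, d.get? (PySem.List.pyGetD cards j 0) = some p ∧
      d.get? (n + 1 - PySem.List.pyGetD cards j 0) = some q := by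
  intro js
  induction js with
  | nil => intro j h; simp [findA] at h
  | cons j0 js ih =>
    intro j h
    simp only [findA] at h
    split_ifs at h with hskip hcond
    · exact ih j h
    · -- found at the head
      cases h
      refine ⟨(d.getD (PySem.List.pyGetD cards j0 0) (-100, false)),
        (d.getD (n + 1 - PySem.List.pyGetD cards j0 0) (-100, false)), ?_, ?_⟩
      · cases hk : d.get? (PySem.List.pyGetD cards j0 0) with
        | none =>
          exfalso; apply hskip
          simp [PySem.Dict.getD_eq_get?_getD, hk]
        | some p =>
          rw [PySem.Dict.getD_eq_get?_getD, hk]; rfl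
      · cases hk : d.get? (n + 1 - PySem.List.pyGetD cards j0 0) with
        | none =>
          exfalso; apply hskip
          simp [PySem.Dict.getD_eq_get?_getD, hk]
        | some p =>
          rw [PySem.Dict.getD_eq_get?_getD, hk]; rfl
    · exact ih j h
theorem scanB_eq_findA (cards : List Int) (n : Int)
    (dA dB : PySem.Dict Int (Int × Bool)) (hR : DictRel dA dB) (hI : CostInv dA) :
    ∀ (js : List Int) (f1 f2 : Int), (∀ j ∈ js, 0 ≤ j) →
    scanB cards (n + 1) dB js f1 f2 =
      match findA cards n dA condA0 js with
      | some j => some ((0 : Int), j)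
      | none =>
        match (if 0 ≤ f1 then some f1 else findA cards n dA condA1 js) with
        | some j => some ((1 : Int), j)
        | none =>
          match (if 0 ≤ f2 then some f2 else findA cards n dA condA2 js) with
          | some j => some ((2 : Int), j)
          | none => none := by
  intro js
  induction js with
  | nil =>
    intro f1 f2 _
    by_cases h1 : 0 ≤ f1 <;> by_cases h2 : 0 ≤ f2 <;> simp [scanB, findA, h1, h2]
  | cons j js ih =>
    intro f1 f2 hnn
    have hj : (0 : Int) ≤ j := hnn j (by simp)
    have hnn' : ∀ x ∈ js, (0 : Int) ≤ x := fun x hx => hnn x (by simp [hx])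
    simp only [scanB, findA]
    rw [← hR (PySem.List.pyGetD cards j 0), ← hR (n + 1 - PySem.List.pyGetD cards j 0)]
    cases hv : dA.get? (PySem.List.pyGetD cards j 0) with
    | none =>
      have hl : dA.getD (PySem.List.pyGetD cards j 0) (-100, false) = (-100, false) := by
        rw [PySem.Dict.getD_eq_get?_getD, hv]; rfl
      rw [hl]
      norm_num
      exact ih f1 f2 hnn'
    | some p =>
      have hl : dA.getD (PySem.List.pyGetD cards j 0) (-100, false) = p := by
        rw [PySem.Dict.getD_eq_get?_getD, hv]; rfl
      cases hw : dA.get? (n + 1 - PySem.List.pyGetD cards j 0) with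
      | none =>
        have hr : dA.getD (n + 1 - PySem.List.pyGetD cards j 0) (-100, false) = (-100, false) := by
          rw [PySem.Dict.getD_eq_get?_getD, hw]; rfl
        rw [hl, hr]
        norm_num
        exact ih f1 f2 hnn'
      | some q =>
        have hr : dA.getD (n + 1 - PySem.List.pyGetD cards j 0) (-100, false) = q := by
          rw [PySem.Dict.getD_eq_get?_getD, hw]; rfl
        rw [hl, hr]
        dsimp only
        have hp := hI _ p hv
        have hq := hI _ q hw
        by_cases hu : p.2 || q.2
        · -- used: everything skips
          rw [if_pos hu]
          have : (decide (p.1 = -100) || p.2 || decide (q.1 = -100) || q.2) = true := by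
            rcases Bool.or_eq_true_iff.mp hu with h | h <;> simp [h]
          rw [this]
          simp only [if_true]
          exact ih f1 f2 hnn'
        · rw [if_neg hu]
          have hpu : p.2 = false := by
            cases hp2 : p.2 <;> simp [hp2] at hu ⊢
          have hqu : q.2 = false := by
            cases hq2 : q.2 <;> simp [hq2] at hu ⊢
          have hskip : (decide (p.1 = -100) || p.2 || decide (q.1 = -100) || q.2) = false := by
            simp [hpu, hqu]
            constructor <;> omega
          rw [hskip]
          simp only [Bool.false_eq_true, if_false]
          rcases hp with hp0 | hp1 <;> rcases hq with hq0 | hq1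
          · -- cost 0 + 0 : free pair found here
            have c0 : condA0 p.1 q.1 = true := by simp [condA0, hp0, hq0]
            have s0 : p.1 + q.1 = 0 := by omega
            rw [c0, s0]
            simp
          · -- 0 + 1 : cost-1 candidate
            have c0 : condA0 p.1 q.1 = false := by simp [condA0]; omega
            have c1 : condA1 p.1 q.1 = true := by simp [condA1]; omega
            have c2 : condA2 p.1 q.1 = false := by simp [condA2]; omega
            rw [c0, c1, c2]
            have s0 : ¬ (p.1 + q.1 = 0) := by omega
            have s1 : p.1 + q.1 = 1 := by omega
            rw [if_neg s0, if_pos s1]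
            simp only [Bool.false_eq_true, if_false, if_true]
            rw [ih _ f2 hnn']
            cases hF0 : findA cards n dA condA0 js
            · by_cases h1 : 0 ≤ f1
              · rw [if_neg (by omega : ¬ f1 < 0), if_pos h1, if_pos h1]
              · rw [if_pos (by omega : f1 < 0), if_pos hj, if_neg h1]
            · rfl
          · -- 1 + 0 : cost-1 candidate
            have c0 : condA0 p.1 q.1 = false := by simp [condA0]; omega
            have c1 : condA1 p.1 q.1 = true := by simp [condA1]; omega
            have c2 : condA2 p.1 q.1 = false := by simp [condA2]; omega
            rw [c0, c1, c2]
            have s0 : ¬ (p.1 + q.1 = 0) := by omega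
            have s1 : p.1 + q.1 = 1 := by omega
            rw [if_neg s0, if_pos s1]
            simp only [Bool.false_eq_true, if_false, if_true]
            rw [ih _ f2 hnn']
            cases hF0 : findA cards n dA condA0 js
            · by_cases h1 : 0 ≤ f1
              · rw [if_neg (by omega : ¬ f1 < 0), if_pos h1, if_pos h1]
              · rw [if_pos (by omega : f1 < 0), if_pos hj, if_neg h1]
            · rfl
          · -- 1 + 1 : cost-2 candidate
            have c0 : condA0 p.1 q.1 = false := by simp [condA0]; omega
            have c1 : condA1 p.1 q.1 = false := by simp [condA1]; omega
            have c2 : condA2 p.1 q.1 = true := by simp [condA2]; omega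
            rw [c0, c1, c2]
            have s0 : ¬ (p.1 + q.1 = 0) := by omega
            have s1 : ¬ (p.1 + q.1 = 1) := by omega
            rw [if_neg s0, if_neg s1]
            simp only [Bool.false_eq_true, if_false, if_true]
            rw [ih f1 _ hnn']
            cases hF0 : findA cards n dA condA0 js
            · cases hF1 : (if 0 ≤ f1 then some f1 else findA cards n dA condA1 js)
              · by_cases h2 : 0 ≤ f2
                · rw [if_neg (by omega : ¬ f2 < 0), if_pos h2, if_pos h2]
                · rw [if_pos (by omega : f2 < 0), if_pos hj, if_neg h2]
              · rfl
            · rfl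

theorem loopA_eq_loopB (cards : List Int) (n n3 : Int) :
    ∀ (rs : List Int) (coin : Int) (dA dB : PySem.Dict Int (Int × Bool)) (acc : Int),
    DictRel dA dB → CostInv dA →
    loopA cards n n3 (rs.map (· + 1)) coin dA acc = loopB cards n n3 rs coin dB acc := by
  intro rs
  induction rs with
  | nil => intro coin dA dB acc _ _; simp [loopA, loopB]
  | cons r rest ih =>
    intro coin dA dB acc hR hI
    simp only [List.map_cons, loopA, loopB]
    rw [show (r + 1 - 1 : Int) = r from by ring]
    have hR1 : DictRel
        ((dA.insert (PySem.List.pyGetD cards (n3 + 2 * r) 0) (1, false)).insert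
          (PySem.List.pyGetD cards (n3 + 2 * r + 1) 0) (1, false))
        ((dB.insert (PySem.List.pyGetD cards (n3 + 2 * r) 0) (1, false)).insert
          (PySem.List.pyGetD cards (n3 + 2 * r + 1) 0) (1, false)) :=
      dictRel_insert _ _ _ _ (dictRel_insert _ _ _ _ hR)
    have hI1 : CostInv
        ((dA.insert (PySem.List.pyGetD cards (n3 + 2 * r) 0) (1, false)).insert
          (PySem.List.pyGetD cards (n3 + 2 * r + 1) 0) (1, false)) :=
      costInv_insert _ _ _ _ (Or.inr rfl) (costInv_insert _ _ _ _ (Or.inr rfl) hI)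
    set d1 := ((dA.insert (PySem.List.pyGetD cards (n3 + 2 * r) 0) (1, false)).insert
        (PySem.List.pyGetD cards (n3 + 2 * r + 1) 0) (1, false)) with hd1
    set st1 := ((dB.insert (PySem.List.pyGetD cards (n3 + 2 * r) 0) (1, false)).insert
        (PySem.List.pyGetD cards (n3 + 2 * r + 1) 0) (1, false)) with hst1
    have hjs : ∀ j ∈ PySem.List.pyRange 0 (n3 + 2 * r + 2) 1, (0 : Int) ≤ j := by
      intro j hjm
      exact (PySem.List.mem_pyRange_one.mp hjm).1
    rw [scanB_eq_findA cards n d1 st1 hR1 hI1 _ (-1) (-1) hjs]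
    rw [if_neg (by norm_num : ¬ (0 : Int) ≤ -1), if_neg (by norm_num : ¬ (0 : Int) ≤ -1)]
    cases hF0 : findA cards n d1 condA0 (PySem.List.pyRange 0 (n3 + 2 * r + 2) 1) with
    | some j =>
      dsimp only
      rw [if_neg (by simp : ¬ ((0 : Int) ≠ 0 ∧ coin < 0))]
      rw [show coin - 0 = coin from by ring]
      obtain ⟨p, q, hp, hq⟩ := findA_found cards n d1 condA0 _ j hF0
      exact ih coin _ _ (r + 1)
        (markA_eq_markB d1 st1 (PySem.List.pyGetD cards j 0) n hR1 p hp q hq)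
        (costInv_markA d1 _ n hI1)
    | none =>
      cases hF1 : findA cards n d1 condA1 (PySem.List.pyRange 0 (n3 + 2 * r + 2) 1) with
      | some j =>
        dsimp only
        by_cases hc1 : coin < 1
        · rw [if_pos hc1, if_pos (by constructor <;> [norm_num; omega] :
            ((1 : Int) ≠ 0 ∧ coin < 1))]
        · rw [if_neg hc1, if_neg (by omega : ¬ ((1 : Int) ≠ 0 ∧ coin < 1))]
          obtain ⟨p, q, hp, hq⟩ := findA_found cards n d1 condA1 _ j hF1
          exact ih (coin - 1) _ _ (r + 1)
            (markA_eq_markB d1 st1 (PySem.List.pyGetD cards j 0) n hR1 p hp q hq)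
            (costInv_markA d1 _ n hI1)
      | none =>
        cases hF2 : findA cards n d1 condA2 (PySem.List.pyRange 0 (n3 + 2 * r + 2) 1) with
        | some j =>
          dsimp only
          by_cases hc1 : coin < 1
          · rw [if_pos hc1, if_pos (by omega : ((2 : Int) ≠ 0 ∧ coin < 2))]
          · rw [if_neg hc1]
            by_cases hc2 : coin < 2
            · rw [if_pos hc2, if_pos (by omega : ((2 : Int) ≠ 0 ∧ coin < 2))]
            · rw [if_neg hc2, if_neg (by omega : ¬ ((2 : Int) ≠ 0 ∧ coin < 2))]
              obtain ⟨p, q, hp, hq⟩ := findA_found cards n d1 condA2 _ j hF2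
              exact ih (coin - 2) _ _ (r + 1)
                (markA_eq_markB d1 st1 (PySem.List.pyGetD cards j 0) n hR1 p hp q hq)
                (costInv_markA d1 _ n hI1)
        | none =>
          dsimp only
          split_ifs <;> rfl

theorem pyRange_map_shift (m : Nat) :
    PySem.List.pyRange 1 ((m : Int) + 1) 1 = (PySem.List.pyRange 0 (m : Int) 1).map (· + 1) := by
  induction m with
  | zero => simp [PySem.List.pyRange_one_eq_nil]
  | succ k ihk =>
    push_cast
    rw [PySem.List.pyRange_one_succ_right (by omega : (1 : Int) ≤ (k : Int) + 1),
      PySem.List.pyRange_one_succ_right (by omega : (0 : Int) ≤ (k : Int)),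
      List.map_append, ihk]
    simp

theorem map_pyGetD_take : ∀ (m : Nat) (xs : List Int), m ≤ xs.length →
    (PySem.List.pyRange 0 (m : Int) 1).map (fun i => PySem.List.pyGetD xs i 0) = xs.take m := by
  intro m
  induction m with
  | zero => intro xs _; simp [PySem.List.pyRange_one_eq_nil]
  | succ k ihk =>
    intro xs hm
    push_cast
    rw [PySem.List.pyRange_one_succ_right (by omega : (0 : Int) ≤ (k : Int)), List.map_append,
      ihk xs (by omega), List.take_add_one]
    simp [PySem.List.pyGetD_natCast, List.getD_eq_getElem?_getD,
      List.getElem?_eq_getElem (by omega : k < xs.length)]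

theorem costInv_foldl (f : Int → Int) :
    ∀ (l : List Int) (d : PySem.Dict Int (Int × Bool)), CostInv d →
    CostInv (l.foldl (fun d x => d.insert (f x) ((0 : Int), false)) d) := by
  intro l
  induction l with
  | nil => intro d h; exact h
  | cons x xs ih =>
    intro d h
    exact ih _ (costInv_insert d (f x) 0 false (Or.inl rfl) h)

theorem costInv_empty : CostInv PySem.Dict.empty := by
  intro v p h
  rw [PySem.Dict.get?_empty] at h
  cases h

theorem solution_eq (coin : Int) (cards : List Int) :
    solution coin cards = solution_alt coin cards := by
  unfold solution solution_alt
  dsimp only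
  rw [PySem.List.len_eq,
    show PySem.Int.floordiv (cards.length : Int) 3 = ((cards.length / 3 : Nat) : Int) from
      by exact_mod_cast PySem.Int.floordiv_natCast cards.length 3]
  have hinit : (PySem.List.slice cards (some 0) (some ((cards.length / 3 : Nat) : Int))).foldl
      (fun d c => d.insert c ((0 : Int), false)) PySem.Dict.empty
      = (PySem.List.pyRange 0 ((cards.length / 3 : Nat) : Int) 1).foldl
      (fun d i => d.insert (PySem.List.pyGetD cards i 0) ((0 : Int), false)) PySem.Dict.empty := by
    rw [PySem.List.slice_zero_start, PySem.List.slice_to_natCast,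
      ← map_pyGetD_take (cards.length / 3) cards (Nat.div_le_self _ _), List.foldl_map]
  rw [hinit, pyRange_map_shift]
  congr 1
  exact loopA_eq_loopB cards (cards.length : Int) ((cards.length / 3 : Nat) : Int)
    (PySem.List.pyRange 0 ((cards.length / 3 : Nat) : Int) 1) coin
    ((PySem.List.pyRange 0 ((cards.length / 3 : Nat) : Int) 1).foldl
      (fun d i => d.insert (PySem.List.pyGetD cards i 0) ((0 : Int), false)) PySem.Dict.empty)
    ((PySem.List.pyRange 0 ((cards.length / 3 : Nat) : Int) 1).foldl
      (fun d i => d.insert (PySem.List.pyGetD cards i 0) ((0 : Int), false)) PySem.Dict.empty)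
    0 (fun v => rfl)
    (costInv_foldl (fun i => PySem.List.pyGetD cards i 0) _ PySem.Dict.empty costInv_empty)

-- ===== VERDICT (by name: the statement is the Claim_ definition above) =====
theorem solution_spec : Claim_equal_solution := by
  intro coin cards _
  unfold Spec_solution
  exact solution_eq coin cards
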